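-- pv_equiv track=rewrite | github.com/zedarvates/StoryCore-Engine | test_cleanup/value_assessment/unique_coverage.py | identify_unique_coverage_tests
-- ===== SOURCE A (Python) =====
-- from typing import Dict, List, Set
--
-- def identify_unique_coverage_tests(
--     test_coverage_map: Dict[str, Dict[str, Set[int]]],
--     min_unique_lines: int = 1
-- ) -> List[str]:
--     """
--     Identify tests that cover code no other test covers.
--
--     Args:
--         test_coverage_map: Dictionary mapping test names to their coverage data
--                           (file -> set of line numbers)
--         min_unique_lines: Minimum number of unique lines to be considered valuable
--
--     Returns:
--         List of test names that have unique coverage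
--
--     Requirements: 5.3
--     """
--     valuable_tests = []
--
--     for test_name in test_coverage_map.keys():
--         unique_lines = _calculate_unique_coverage(test_name, test_coverage_map)
--
--         if unique_lines >= min_unique_lines:
--             valuable_tests.append(test_name)
--
--     return valuable_tests
--
-- def _calculate_unique_coverage(
--     test_name: str,
--     test_coverage_map: Dict[str, Dict[str, Set[int]]]
-- ) -> int:
--     """
--     Calculate the number of unique lines covered only by this test.
--
--     Args:
--         test_name: Name of the test to analyze
--         test_coverage_map: Dictionary mapping test names to their coverage data
--
--     Returns:
--         Number of lines uniquely covered by this test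
--     """
--     if test_name not in test_coverage_map:
--         return 0
--
--     test_coverage = test_coverage_map[test_name]
--
--     # Get all lines covered by this test
--     test_lines = set()
--     for file_path, lines in test_coverage.items():
--         for line_num in lines:
--             test_lines.add(f"{file_path}:{line_num}")
--
--     # Get all lines covered by other tests
--     other_lines = set()
--     for other_test, coverage_data in test_coverage_map.items():
--         if other_test != test_name:
--             for file_path, lines in coverage_data.items():
--                 for line_num in lines:
--                     other_lines.add(f"{file_path}:{line_num}")
--
--     # Calculate unique coverage
--     unique_lines = test_lines - other_lines
--
--     return len(unique_lines)
-- ===== SOURCE B (Python) =====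
-- def identify_unique_coverage_tests(test_coverage_map, min_unique_lines=1):
--     # One pass: per-test encoded line sets, then a global coverage counter;
--     # a line is unique iff its count is exactly 1.
--     per_test = {
--         test_name: {f"{file_path}:{line_num}"
--                     for file_path, lines in coverage.items()
--                     for line_num in lines}
--         for test_name, coverage in test_coverage_map.items()
--     }
--     counts = {}
--     for lines in per_test.values():
--         for line in lines:
--             counts[line] = counts.get(line, 0) + 1
--     return [test_name for test_name, lines in per_test.items()
--             if sum(1 for line in lines if counts[line] == 1) >= min_unique_lines]
-- ===== Notes on version B (the rewrite author's own statement) =====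
-- stated objective: faster
-- what changed: Instead of recomputing, for every test, the union of all other tests' covered lines (a full rescan of the map per test), B builds each test's encoded line set once and a single global counter of how many tests cover each line, then counts per test the lines with count 1; Pre_ excludes association lists with duplicate test names, which do not represent any Python dict (dict keys are unique), so nothing A actually computes on is excluded.
import Mathlib
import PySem

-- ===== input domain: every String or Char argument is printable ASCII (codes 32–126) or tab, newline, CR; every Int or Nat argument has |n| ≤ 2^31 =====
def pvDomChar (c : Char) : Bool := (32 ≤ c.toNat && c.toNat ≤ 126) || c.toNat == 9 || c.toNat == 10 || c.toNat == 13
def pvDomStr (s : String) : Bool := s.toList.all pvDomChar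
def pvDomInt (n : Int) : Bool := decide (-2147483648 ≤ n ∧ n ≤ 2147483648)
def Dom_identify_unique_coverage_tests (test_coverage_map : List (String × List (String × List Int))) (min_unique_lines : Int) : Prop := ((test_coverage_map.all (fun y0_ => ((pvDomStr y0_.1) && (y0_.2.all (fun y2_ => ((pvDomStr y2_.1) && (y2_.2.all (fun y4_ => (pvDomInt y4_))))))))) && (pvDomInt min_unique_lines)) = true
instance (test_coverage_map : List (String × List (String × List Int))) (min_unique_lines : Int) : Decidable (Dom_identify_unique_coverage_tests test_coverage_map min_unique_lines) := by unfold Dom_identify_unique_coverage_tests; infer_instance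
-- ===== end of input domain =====

-- B replaces A's per-test rescan of the whole map (union of all other tests' lines, recomputed for
-- every test) by per-test line sets built once plus one global coverage counter; equality of the
-- RETURN values is what is proved (neither program mutates its input).

-- ===== PORT A =====
-- f"{file_path}:{line_num}" — the same f-string appears verbatim in both Pythons, so both ports share it
def pvEncode (file_path : String) (line_num : Int) : String :=
  file_path ++ ":" ++ PySem.Int.toStr line_num

-- 'for file_path, lines in cov.items(): for line_num in lines: s.add(f"{file_path}:{line_num}")'
-- — the nested set-building loop, appearing twice in A and once (from the empty set) in B
def pvAddLines (s : PySem.Set String) (cov : List (String × List Int)) : PySem.Set String :=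
  cov.foldl (fun s p => p.2.foldl (fun s n => PySem.Set.add s (pvEncode p.1 n)) s) s

def pvCalculateUniqueCoverage (test_name : String)
    (test_coverage_map : List (String × List (String × List Int))) : Int :=
  if (test_coverage_map.map (·.1)).contains test_name = false then 0
  else
    let test_coverage := ((test_coverage_map.find? (fun p => p.1 == test_name)).map (·.2)).getD []
    let test_lines := pvAddLines PySem.Set.empty test_coverage
    let other_lines := test_coverage_map.foldl
      (fun s p => if p.1 ≠ test_name then pvAddLines s p.2 else s) PySem.Set.empty
    ((PySem.Set.diff test_lines other_lines).length : Int)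

def identify_unique_coverage_tests (test_coverage_map : List (String × List (String × List Int))) (min_unique_lines : Int) : List String :=
  test_coverage_map.foldl
    (fun valuable_tests p =>
      if min_unique_lines ≤ pvCalculateUniqueCoverage p.1 test_coverage_map
      then valuable_tests ++ [p.1] else valuable_tests) []

-- ===== PORT B =====
def identify_unique_coverage_tests_alt (test_coverage_map : List (String × List (String × List Int))) (min_unique_lines : Int) : List String :=
  let per_test : List (String × PySem.Set String) :=
    test_coverage_map.map (fun p => (p.1, pvAddLines PySem.Set.empty p.2))
  let counts : PySem.Dict String Int :=
    per_test.foldl (fun d p => p.2.foldl (fun d line => d.modify line 0 (· + 1)) d) PySem.Dict.empty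
  (per_test.filter (fun p =>
      min_unique_lines ≤ (p.2.map (fun line => if counts.getD line 0 = 1 then (1 : Int) else 0)).sum)).map (·.1)

-- ===== PRECONDITION & SPEC =====
-- Pre_ excludes association lists with duplicate test names: such lists represent no Python dict
-- (dict keys are unique), so no input the Python A actually runs on is excluded.
def Pre_identify_unique_coverage_tests (test_coverage_map : List (String × List (String × List Int))) (min_unique_lines : Int) : Prop :=
  (test_coverage_map.map (·.1)).Nodup

instance (test_coverage_map : List (String × List (String × List Int))) (min_unique_lines : Int) : Decidable (Pre_identify_unique_coverage_tests test_coverage_map min_unique_lines) := by unfold Pre_identify_unique_coverage_tests; infer_instance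

def pvWitness_identify_unique_coverage_tests : (List (String × List (String × List Int))) × Int :=
  ([("t1", [("f", [1, 2])]), ("t2", [("f", [2])])], 1)

def Spec_identify_unique_coverage_tests (test_coverage_map : List (String × List (String × List Int))) (min_unique_lines : Int) (out : List String) : Prop := out = identify_unique_coverage_tests_alt test_coverage_map min_unique_lines
instance (test_coverage_map : List (String × List (String × List Int))) (min_unique_lines : Int) (out : List String) : Decidable (Spec_identify_unique_coverage_tests test_coverage_map min_unique_lines out) := by unfold Spec_identify_unique_coverage_tests; infer_instance

-- ===== CLAIM (what is proved, stated in full; the proofs are below) =====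
def Claim_equal_identify_unique_coverage_tests : Prop := ∀ (test_coverage_map : List (String × List (String × List Int))) (min_unique_lines : Int), Dom_identify_unique_coverage_tests test_coverage_map min_unique_lines → Pre_identify_unique_coverage_tests test_coverage_map min_unique_lines → Spec_identify_unique_coverage_tests test_coverage_map min_unique_lines (identify_unique_coverage_tests test_coverage_map min_unique_lines)

-- ===== LEMMAS AND PROOFS =====

theorem pvMemFold (f : String) (ls : List Int) (s : PySem.Set String) (l : String) :
    l ∈ ls.foldl (fun s n => PySem.Set.add s (pvEncode f n)) s ↔ l ∈ s ∨ ∃ n ∈ ls, l = pvEncode f n := by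
  induction ls generalizing s with
  | nil => simp
  | cons a as ih => simp [ih, PySem.Set.mem_add, or_assoc]

theorem pvMem_addLines (cov : List (String × List Int)) (s : PySem.Set String) (l : String) :
    l ∈ pvAddLines s cov ↔ l ∈ s ∨ ∃ p ∈ cov, ∃ n ∈ p.2, l = pvEncode p.1 n := by
  induction cov generalizing s with
  | nil => simp [pvAddLines]
  | cons a as ih => simp [pvAddLines] at ih ⊢; simp [ih, pvMemFold, or_assoc]

theorem pvMem_addLines' (cov : List (String × List Int)) (s : PySem.Set String) (l : String) :
    l ∈ pvAddLines s cov ↔ l ∈ s ∨ l ∈ pvAddLines PySem.Set.empty cov := by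
  simp [pvMem_addLines, PySem.Set.empty]

theorem pvNodupFold (f : String) (ls : List Int) (s : PySem.Set String) (hs : s.Nodup) :
    (ls.foldl (fun s n => PySem.Set.add s (pvEncode f n)) s).Nodup := by
  induction ls generalizing s with
  | nil => exact hs
  | cons a as ih => exact ih _ (PySem.Set.nodup_add _ _ hs)

theorem pvNodup_addLines (cov : List (String × List Int)) (s : PySem.Set String)
    (hs : s.Nodup) : (pvAddLines s cov).Nodup := by
  induction cov generalizing s with
  | nil => exact hs
  | cons a as ih => exact ih _ (pvNodupFold _ _ _ hs)

theorem pvMem_others (m : List (String × List (String × List Int))) (t : String)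
    (s : PySem.Set String) (l : String) :
    l ∈ m.foldl (fun s p => if p.1 ≠ t then pvAddLines s p.2 else s) s
      ↔ l ∈ s ∨ ∃ p ∈ m, p.1 ≠ t ∧ l ∈ pvAddLines PySem.Set.empty p.2 := by
  induction m generalizing s with
  | nil => simp
  | cons a as ih =>
    simp only [List.foldl]
    by_cases h : a.1 = t
    · simp only [h, ne_eq, not_true_eq_false, if_false, ih, List.mem_cons]
      constructor
      · rintro (hs | ⟨p, hp, hne, hm⟩)
        · exact Or.inl hs
        · exact Or.inr ⟨p, Or.inr hp, hne, hm⟩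
      · rintro (hs | ⟨p, (rfl | hp), hne, hm⟩)
        · exact Or.inl hs
        · exact absurd h hne
        · exact Or.inr ⟨p, hp, hne, hm⟩
    · simp only [h, ne_eq, not_false_eq_true, if_true, ih, pvMem_addLines' a.2 s, List.mem_cons]
      constructor
      · rintro ((hs | hm) | ⟨p, hp, hne, hm⟩)
        · exact Or.inl hs
        · exact Or.inr ⟨a, Or.inl rfl, h, hm⟩
        · exact Or.inr ⟨p, Or.inr hp, hne, hm⟩
      · rintro (hs | ⟨p, (rfl | hp), hne, hm⟩)
        · exact Or.inl (Or.inl hs)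
        · exact Or.inl (Or.inr hm)
        · exact Or.inr ⟨p, hp, hne, hm⟩

theorem pvFind_of_nodup (m : List (String × List (String × List Int)))
    (hk : (m.map (·.1)).Nodup) (p : String × List (String × List Int)) (hp : p ∈ m) :
    m.find? (fun q => q.1 == p.1) = some p := by
  induction m with
  | nil => cases hp
  | cons a as ih =>
    simp only [List.map, List.nodup_cons] at hk
    rcases List.mem_cons.mp hp with rfl | hp
    · simp [List.find?]
    · have hne : a.1 ≠ p.1 := by
        intro h; exact hk.1 (h ▸ List.mem_map_of_mem hp)
      rw [List.find?]
      have : (a.1 == p.1) = false := by simp [hne]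
      rw [this, ih hk.2 hp]

theorem pvSum01_eq_zero_iff {α : Type} (f : α → Int) (hf : ∀ x, f x = 0 ∨ f x = 1)
    (l : List α) : (l.map f).sum = 0 ↔ ∀ x ∈ l, f x = 0 := by
  induction l with
  | nil => simp
  | cons a as ih =>
    simp only [List.map, List.sum_cons, List.mem_cons]
    have h1 := hf a
    have h2 : 0 ≤ (as.map f).sum := by
      apply List.sum_nonneg; intro x hx
      simp only [List.mem_map] at hx; rcases hx with ⟨y, _, rfl⟩
      rcases hf y with h | h <;> omega
    constructor
    · intro h
      have ha : f a = 0 := by omega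
      have hs0 : (as.map f).sum = 0 := by omega
      intro x hx; rcases hx with rfl | hx
      · exact ha
      · exact (ih.mp hs0) x hx
    · intro h
      have := ih.mpr (fun x hx => h x (Or.inr hx))
      have := h a (Or.inl rfl)
      omega

theorem pvGetD_counts (ts : List (String × PySem.Set String)) (d : PySem.Dict String Int) (l : String) :
    (ts.foldl (fun d p => p.2.foldl (fun d line => d.modify line 0 (· + 1)) d) d).getD l 0
      = d.getD l 0 + ((ts.map (fun p => ((p.2.count l : Int)))).sum) := by
  induction ts generalizing d with
  | nil => simp
  | cons a as ih => simp [List.foldl, ih, PySem.Dict.getD_foldl_modify_add_one]; ring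

theorem pvCount01 (cov : List (String × List Int)) (l : String) :
    ((pvAddLines PySem.Set.empty cov).count l : Int)
      = if l ∈ pvAddLines PySem.Set.empty cov then 1 else 0 := by
  have hnd : (pvAddLines PySem.Set.empty cov).Nodup := pvNodup_addLines _ _ (by simp [PySem.Set.empty])
  by_cases h : l ∈ pvAddLines PySem.Set.empty cov
  · rw [if_pos h, List.count_eq_one_of_mem hnd h]; rfl
  · rw [if_neg h, List.count_eq_zero.mpr h]; rfl

theorem pvKey (m : List (String × List (String × List Int)))
    (hk : (m.map (·.1)).Nodup) (p : String × List (String × List Int)) (hp : p ∈ m)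
    (l : String) (hl : l ∈ pvAddLines PySem.Set.empty p.2) :
    ((m.map (fun q => ((pvAddLines PySem.Set.empty q.2).count l : Int))).sum = 1)
      ↔ ¬ (∃ q ∈ m, q.1 ≠ p.1 ∧ l ∈ pvAddLines PySem.Set.empty q.2) := by
  rcases List.append_of_mem hp with ⟨m1, m2, rfl⟩
  have hksplit : (m1.map (·.1) ++ p.1 :: m2.map (·.1)).Nodup := by simpa using hk
  rw [List.nodup_append] at hksplit
  obtain ⟨hn1, hn2, hdisj⟩ := hksplit
  have hp1notm1 : p.1 ∉ m1.map (·.1) := fun hx => hdisj _ hx _ List.mem_cons_self rfl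
  have hp1notm2 : p.1 ∉ m2.map (·.1) := (List.nodup_cons.mp hn2).1
  have hne : ∀ q ∈ m1 ++ m2, q.1 ≠ p.1 := by
    intro q hq hqe
    rcases List.mem_append.mp hq with h | h
    · exact hp1notm1 (hqe ▸ List.mem_map_of_mem h)
    · exact hp1notm2 (hqe ▸ List.mem_map_of_mem h)
  have h01 : ∀ q : String × List (String × List Int),
      ((pvAddLines PySem.Set.empty q.2).count l : Int) = 0
        ∨ ((pvAddLines PySem.Set.empty q.2).count l : Int) = 1 := by
    intro q; rw [pvCount01]
    by_cases h : l ∈ pvAddLines PySem.Set.empty q.2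
    · right; rw [if_pos h]
    · left; rw [if_neg h]
  have hmem0 : ∀ q : String × List (String × List Int),
      ((pvAddLines PySem.Set.empty q.2).count l : Int) = 0 ↔ l ∉ pvAddLines PySem.Set.empty q.2 := by
    intro q; rw [pvCount01]
    by_cases h : l ∈ pvAddLines PySem.Set.empty q.2
    · rw [if_pos h]; exact iff_of_false one_ne_zero (not_not_intro h)
    · rw [if_neg h]; exact iff_of_true rfl h
  have hmid : ((pvAddLines PySem.Set.empty p.2).count l : Int) = 1 := by
    rw [pvCount01, if_pos hl]
  have hsum : ((m1 ++ p :: m2).map (fun q => ((pvAddLines PySem.Set.empty q.2).count l : Int))).sum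
      = ((m1.map (fun q => ((pvAddLines PySem.Set.empty q.2).count l : Int))).sum + 1
          + (m2.map (fun q => ((pvAddLines PySem.Set.empty q.2).count l : Int))).sum) := by
    rw [List.map_append, List.map_cons, List.sum_append, List.sum_cons, hmid]; ring
  have hz1 : 0 ≤ (m1.map (fun q => ((pvAddLines PySem.Set.empty q.2).count l : Int))).sum :=
    List.sum_nonneg (by rintro x hx; simp only [List.mem_map] at hx; rcases hx with ⟨y, _, rfl⟩
                        rcases h01 y with h | h <;> omega)
  have hz2 : 0 ≤ (m2.map (fun q => ((pvAddLines PySem.Set.empty q.2).count l : Int))).sum :=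
    List.sum_nonneg (by rintro x hx; simp only [List.mem_map] at hx; rcases hx with ⟨y, _, rfl⟩
                        rcases h01 y with h | h <;> omega)
  rw [hsum]
  constructor
  · intro hsum1
    rintro ⟨q, hq, hqne, hql⟩
    have hq' : q ∈ m1 ++ m2 := by
      rcases List.mem_append.mp hq with h | h
      · exact List.mem_append.mpr (Or.inl h)
      · rcases List.mem_cons.mp h with rfl | h
        · exact absurd rfl hqne
        · exact List.mem_append.mpr (Or.inr h)
    have hz : ((m1 ++ m2).map (fun q => ((pvAddLines PySem.Set.empty q.2).count l : Int))).sum = 0 := by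
      rw [List.map_append, List.sum_append]; omega
    have := (pvSum01_eq_zero_iff _ h01 (m1 ++ m2)).mp hz q hq'
    exact ((hmem0 q).mp this) hql
  · intro hno
    have hall : ∀ q ∈ m1 ++ m2, ((pvAddLines PySem.Set.empty q.2).count l : Int) = 0 := by
      intro q hq
      apply (hmem0 q).mpr
      intro hql
      refine hno ⟨q, ?_, hne q hq, hql⟩
      rcases List.mem_append.mp hq with h | h
      · exact List.mem_append.mpr (Or.inl h)
      · exact List.mem_append.mpr (Or.inr (List.mem_cons_of_mem _ h))
    have := (pvSum01_eq_zero_iff _ h01 (m1 ++ m2)).mpr hall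
    rw [List.map_append, List.sum_append] at this
    omega

theorem pvEntry_eq (m : List (String × List (String × List Int)))
    (hk : (m.map (·.1)).Nodup) (p : String × List (String × List Int)) (hp : p ∈ m) :
    pvCalculateUniqueCoverage p.1 m
      = ((pvAddLines PySem.Set.empty p.2).map (fun line =>
          if ((m.map (fun q => (q.1, pvAddLines PySem.Set.empty q.2))).foldl
                (fun d q => q.2.foldl (fun d line => d.modify line 0 (· + 1)) d)
                (PySem.Dict.empty : PySem.Dict String Int)).getD line 0 = 1
          then (1 : Int) else 0)).sum := by
  have hcontains : (m.map (·.1)).contains p.1 = true := by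
    simp only [List.contains_eq_mem, List.mem_map, decide_eq_true_eq]
    exact ⟨p, hp, rfl⟩
  have hgetd : ∀ l, ((m.map (fun q => (q.1, pvAddLines PySem.Set.empty q.2))).foldl
        (fun d q => q.2.foldl (fun d line => d.modify line 0 (· + 1)) d)
        (PySem.Dict.empty : PySem.Dict String Int)).getD l 0
      = ((m.map (fun q => ((pvAddLines PySem.Set.empty q.2).count l : Int))).sum) := by
    intro l
    rw [pvGetD_counts]
    simp [List.map_map, Function.comp_def]
  rw [pvCalculateUniqueCoverage]
  rw [if_neg (by rw [hcontains]; simp)]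
  rw [pvFind_of_nodup m hk p hp]
  simp only [Option.map_some, Option.getD_some]
  have hdiffeq : PySem.Set.diff (pvAddLines PySem.Set.empty p.2)
      (m.foldl (fun s q => if q.1 ≠ p.1 then pvAddLines s q.2 else s) PySem.Set.empty)
      = (pvAddLines PySem.Set.empty p.2).filter (fun x =>
          !((m.foldl (fun s q => if q.1 ≠ p.1 then pvAddLines s q.2 else s) PySem.Set.empty).contains x)) := rfl
  rw [hdiffeq, ← List.countP_eq_length_filter]
  have hfun : (fun line => if ((m.map (fun q => (q.1, pvAddLines PySem.Set.empty q.2))).foldl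
                (fun d q => q.2.foldl (fun d line => d.modify line 0 (· + 1)) d)
                (PySem.Dict.empty : PySem.Dict String Int)).getD line 0 = 1 then (1 : Int) else 0)
      = (fun line => if (fun line => decide (((m.map (fun q => (q.1, pvAddLines PySem.Set.empty q.2))).foldl
                (fun d q => q.2.foldl (fun d line => d.modify line 0 (· + 1)) d)
                (PySem.Dict.empty : PySem.Dict String Int)).getD line 0 = 1)) line = true then (1 : Int) else 0) := by
    funext x; simp
  rw [hfun, PySem.List.sum_map_ite_one_zero]
  congr 1
  apply List.countP_congr
  intro l hl
  simp only [Bool.not_eq_true', decide_eq_true_eq]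
  simp only [hgetd]
  rw [pvKey m hk p hp l hl]
  rw [show (List.foldl (fun s q => if q.1 ≠ p.1 then pvAddLines s q.2 else s) PySem.Set.empty m).contains l
        = decide (l ∈ List.foldl (fun s q => if q.1 ≠ p.1 then pvAddLines s q.2 else s) PySem.Set.empty m)
      from List.contains_eq_mem l _]
  rw [decide_eq_false_iff_not, pvMem_others]
  simp [PySem.Set.empty]

theorem identify_unique_coverage_tests_spec : Claim_equal_identify_unique_coverage_tests := by
  intro m mu _hdom hpre
  have hk : (m.map (·.1)).Nodup := hpre
  unfold Spec_identify_unique_coverage_tests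
  rw [identify_unique_coverage_tests, identify_unique_coverage_tests_alt]
  have hA : (fun (acc : List String) (p : String × List (String × List Int)) =>
        if mu ≤ pvCalculateUniqueCoverage p.1 m then acc ++ [p.1] else acc)
      = (fun acc p =>
          if (fun (p : String × List (String × List Int)) =>
                decide (mu ≤ pvCalculateUniqueCoverage p.1 m)) p = true
          then acc ++ [p.1] else acc) := by
    funext acc p; simp
  rw [hA, PySem.List.foldl_append_if, List.nil_append]
  rw [List.filter_map, List.map_map]
  rw [List.filter_congr (fun p hp => ?_)]
  · rfl
  · show decide (mu ≤ pvCalculateUniqueCoverage p.1 m) = _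
    simp only [Function.comp_apply]
    rw [pvEntry_eq m hk p hp]
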